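-- pv_equiv track=rewrite | github.com/SebastianMeisel/org-parser | webapp.py | _open_dir_set_for_current
-- ===== SOURCE A (Python) =====
-- def _open_dir_set_for_current(current_rel: str) -> set[str]:
--     """
--     current_rel is like 'org/2025/foo.org'. We want open dirs within ORG_DIR:
--       '2025' for example.
--     """
--     if not current_rel.startswith("org/"):
--         return set()
--     inner = current_rel[len("org/"):]
--     parts = [p for p in inner.split("/") if p]
--     # ancestors excluding filename
--     open_dirs: set[str] = set()
--     acc: list[str] = []
--     for seg in parts[:-1]:
--         acc.append(seg)
--         open_dirs.add("/".join(acc))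
--     return open_dirs
-- ===== SOURCE B (Python) =====
-- def _open_dir_set_for_current(current_rel: str) -> set[str]:
--     if not current_rel.startswith("org/"):
--         return set()
--     parts = [p for p in current_rel[4:].split("/") if p]
--     d = "/".join(parts[:-1])
--     out = {d[:i] for i, ch in enumerate(d) if ch == "/"}
--     if d:
--         out.add(d)
--     return out
-- ===== Notes on version B (the rewrite author's own statement) =====
-- stated objective: alternative
-- what changed: Instead of growing a segment list and re-joining it for every ancestor, B joins the directory segments once into a single string d and reads the ancestor set off as d's prefixes at each '/' position plus d itself.
import Mathlib
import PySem

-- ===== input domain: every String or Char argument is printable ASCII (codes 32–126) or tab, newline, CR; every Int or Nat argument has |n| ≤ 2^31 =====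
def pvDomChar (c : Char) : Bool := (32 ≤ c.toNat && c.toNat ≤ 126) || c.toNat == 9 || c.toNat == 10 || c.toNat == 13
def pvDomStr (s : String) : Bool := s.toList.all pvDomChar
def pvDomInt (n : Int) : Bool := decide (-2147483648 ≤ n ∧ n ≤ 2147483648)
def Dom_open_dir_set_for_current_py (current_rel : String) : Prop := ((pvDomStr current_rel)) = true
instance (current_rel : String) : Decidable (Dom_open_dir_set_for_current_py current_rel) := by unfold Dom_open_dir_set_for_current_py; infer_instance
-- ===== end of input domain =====

-- B replaces A's grow-a-list-and-rejoin loop by one join of the directory segments followed by a scan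
-- of that string's '/' positions (alternative decomposition; the return value is a Python set either way).

-- ===== PORT A =====
def open_dir_set_for_current_py (current_rel : String) : List String :=
  if PySem.Str.startswith current_rel "org/" = false then
    PySem.Set.empty
  else
    let inner := PySem.Str.slice current_rel (some 4) none
    let parts := ((PySem.Str.split? inner "/").getD []).filter (fun p => p != "")
    let st := (PySem.List.slice parts none (some (-1))).foldl
      (fun (st : PySem.Set String × List String) seg =>
        let acc := st.2 ++ [seg]
        (PySem.Set.add st.1 (PySem.Str.join "/" acc), acc))
      (PySem.Set.empty, [])
    st.1

-- ===== PORT B =====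
def open_dir_set_for_current_py_alt (current_rel : String) : List String :=
  if PySem.Str.startswith current_rel "org/" = false then
    PySem.Set.empty
  else
    let parts := ((PySem.Str.split? (PySem.Str.slice current_rel (some 4) none) "/").getD []).filter (fun p => p != "")
    let d := PySem.Str.join "/" (PySem.List.slice parts none (some (-1)))
    let out := (PySem.List.enumerate d.toList 0).foldl
      (fun (s : PySem.Set String) ic =>
        if ic.2 == '/' then PySem.Set.add s (PySem.Str.slice d none (some ic.1)) else s)
      PySem.Set.empty
    if d != "" then PySem.Set.add out d else out

-- ===== PRECONDITION & SPEC =====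
def Spec_open_dir_set_for_current_py (current_rel : String) (out : List String) : Prop := out = open_dir_set_for_current_py_alt current_rel
instance (current_rel : String) (out : List String) : Decidable (Spec_open_dir_set_for_current_py current_rel out) := by unfold Spec_open_dir_set_for_current_py; infer_instance

-- ===== CLAIM (what is proved, stated in full; the proofs are below) =====
def Claim_equal_open_dir_set_for_current_py : Prop := ∀ (current_rel : String), Dom_open_dir_set_for_current_py current_rel → Spec_open_dir_set_for_current_py current_rel (open_dir_set_for_current_py current_rel)

-- ===== LEMMAS AND PROOFS =====

-- list of joins of the nonempty prefixes of segs ("a", "a/b", "a/b/c", …)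
def pvPJ (segs : List String) : List String :=
  (List.range segs.length).map (fun k => PySem.Str.join "/" (List.take (k+1) segs))

theorem pvSep_toList : ("/" : String).toList = ['/'] := by decide

-- join of an append (both halves nonempty as lists) splits at one separator
theorem pvJoin_append (sep : List Char) (A B : List (List Char)) (hA : A ≠ []) (hB : B ≠ []) :
    PySem.Chars.join sep (A ++ B) = PySem.Chars.join sep A ++ sep ++ PySem.Chars.join sep B := by
  induction A with
  | nil => exact absurd rfl hA
  | cons a t ih =>
    cases t with
    | nil =>
      cases B with
      | nil => exact absurd rfl hB
      | cons b u => simp [PySem.Chars.join_singleton, PySem.Chars.join_cons_cons]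
    | cons a' t' =>
      have e1 : PySem.Chars.join sep ((a :: a' :: t') ++ B)
          = a ++ sep ++ PySem.Chars.join sep ((a' :: t') ++ B) := by
        simp only [List.cons_append]
        rw [PySem.Chars.join_cons_cons]
      rw [e1, ih (by simp), PySem.Chars.join_cons_cons]
      simp [List.append_assoc]

-- strict length growth of a proper nonempty prefix join
theorem pvJoin_take_lt (L : List (List Char)) (m : Nat) (h1 : 1 ≤ m) (hm : m < L.length) :
    (PySem.Chars.join ['/'] (L.take m)).length < (PySem.Chars.join ['/'] L).length := by
  have hL : L ≠ [] := by intro h; simp [h] at hm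
  have ht : L.take m ≠ [] := by
    intro h
    rcases List.take_eq_nil_iff.mp h with h' | h'
    · omega
    · exact hL h'
  have hd : L.drop m ≠ [] := by
    intro h
    have := List.drop_eq_nil_iff.mp h
    omega
  conv_rhs => rw [← List.take_append_drop m L]
  rw [pvJoin_append ['/'] _ _ ht hd]
  simp only [List.length_append, List.length_cons, List.length_nil]
  omega

theorem pvFresh (l : List String) (m : Nat) (h1 : 1 ≤ m) (h2 : m < l.length) :
    (PySem.Str.join "/" (l.take m)).toList.length < (PySem.Str.join "/" l).toList.length := by
  rw [PySem.Str.toList_join, PySem.Str.toList_join, pvSep_toList, List.map_take]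
  exact pvJoin_take_lt (l.map String.toList) m h1 (by simpa using h2)

theorem pvNotMem_snoc (l : List String) (x : String) :
    PySem.Str.join "/" (l ++ [x]) ∉ pvPJ l := by
  intro hmem
  unfold pvPJ at hmem
  simp only [List.mem_map, List.mem_range] at hmem
  obtain ⟨k, hk, he⟩ := hmem
  rw [(List.take_append_of_le_length (by omega) : List.take (k+1) (l ++ [x]) = List.take (k+1) l).symm] at he
  have hlt := pvFresh (l ++ [x]) (k+1) (by omega) (by simp; omega)
  rw [he] at hlt
  omega

theorem pvNotMem_dropLast (l : List String) (hl : l ≠ []) :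
    PySem.Str.join "/" l ∉ pvPJ l.dropLast := by
  intro hmem
  unfold pvPJ at hmem
  simp only [List.mem_map, List.mem_range, List.length_dropLast] at hmem
  obtain ⟨k, hk, he⟩ := hmem
  have h0 : 0 < l.length := List.length_pos_iff.mpr hl
  have heq : List.take (k+1) l.dropLast = List.take (k+1) l := by
    rw [List.dropLast_eq_take, List.take_take]
    congr 1
    omega
  rw [heq] at he
  have hlt := pvFresh l (k+1) (by omega) (by omega)
  rw [he] at hlt
  omega

theorem pvPJ_snoc (l : List String) (x : String) :
    pvPJ (l ++ [x]) = pvPJ l ++ [PySem.Str.join "/" (l ++ [x])] := by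
  unfold pvPJ
  rw [show (l ++ [x]).length = l.length + 1 by simp, List.range_succ, List.map_append]
  congr 1
  · apply List.map_congr_left
    intro k hk
    rw [List.take_append_of_le_length (by simp at hk; omega)]
  · have ht : List.take (l.length + 1) (l ++ [x]) = l ++ [x] := List.take_of_length_le (by simp)
    simp [ht]

theorem pvPJ_eq_dropLast (l : List String) (hl : l ≠ []) :
    pvPJ l = pvPJ l.dropLast ++ [PySem.Str.join "/" l] := by
  conv_lhs => rw [← List.dropLast_append_getLast hl]
  rw [pvPJ_snoc, List.dropLast_append_getLast hl]

-- characterization of A's fold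
theorem pvA_fold (l : List String) :
    (l.foldl
      (fun (st : PySem.Set String × List String) seg =>
        (PySem.Set.add st.1 (PySem.Str.join "/" (st.2 ++ [seg])), st.2 ++ [seg]))
      (PySem.Set.empty, [])) = (pvPJ l, l) := by
  induction l using List.reverseRecOn with
  | nil => simp [pvPJ]
  | append_singleton l x ih =>
    rw [List.foldl_append, ih]
    simp only [List.foldl_cons, List.foldl_nil]
    rw [PySem.Set.add_of_not_mem (pvNotMem_snoc l x), ← pvPJ_snoc]

theorem pvSliceTo (s : String) (k : Nat) :
    PySem.Str.slice s none (some (k : Int)) = String.ofList (s.toList.take k) := by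
  simp [PySem.Str.slice, PySem.List.slice_to_natCast]

theorem pvScan_skip (d : String) (L : List (Int × Char)) (s : PySem.Set String)
    (h : ∀ p ∈ L, p.2 ≠ '/') :
    L.foldl (fun (s : PySem.Set String) ic =>
      if ic.2 == '/' then PySem.Set.add s (PySem.Str.slice d none (some ic.1)) else s) s = s := by
  induction L generalizing s with
  | nil => rfl
  | cons p t ih =>
    have h2 : ¬ ((p.2 == '/') = true) := by
      simp only [beq_iff_eq]
      exact h p (by simp)
    rw [List.foldl_cons, if_neg h2]
    exact ih _ (fun q hq => h q (by simp [hq]))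

-- B's character scan over the joined string yields the proper-prefix joins
set_option maxHeartbeats 1600000 in
theorem pvB_scan (l : List String) (h : ∀ p ∈ l, p ≠ "" ∧ ('/' : Char) ∉ p.toList) :
    ((PySem.List.enumerate (PySem.Str.join "/" l).toList 0).foldl
      (fun (s : PySem.Set String) ic =>
        if ic.2 == '/' then PySem.Set.add s (PySem.Str.slice (PySem.Str.join "/" l) none (some ic.1)) else s)
      PySem.Set.empty) = pvPJ l.dropLast := by
  induction l using List.reverseRecOn with
  | nil =>
    have hnil : (PySem.Str.join "/" ([] : List String)).toList = [] := by
      rw [PySem.Str.toList_join]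
      simp [PySem.Chars.join_nil]
    rw [hnil]
    simp [pvPJ, PySem.List.enumerate]
  | append_singleton l x ih =>
    have hx := h x (by simp)
    by_cases hl : l = []
    · subst hl
      have hone : (PySem.Str.join "/" ([] ++ [x])).toList = x.toList := by
        rw [PySem.Str.toList_join]
        simp [PySem.Chars.join_singleton]
      rw [hone, pvScan_skip _ _ _ ?hskip]
      · simp [pvPJ]
      case hskip =>
        intro p hp
        obtain ⟨k, hk, rfl⟩ := (PySem.List.mem_enumerate_iff _ _ _).mp hp
        intro he
        exact hx.2 (he ▸ List.getElem_mem hk)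
    · have hgood : ∀ p ∈ l, p ≠ "" ∧ ('/' : Char) ∉ p.toList := fun p hp => h p (by simp [hp])
      have hkey : (PySem.Str.join "/" (l ++ [x])).toList
          = (PySem.Str.join "/" l).toList ++ '/' :: x.toList := by
        rw [PySem.Str.toList_join, PySem.Str.toList_join, List.map_append, pvSep_toList,
          pvJoin_append ['/'] _ _ (by simp [hl]) (by simp)]
        simp [PySem.Chars.join_singleton]
      rw [hkey, PySem.List.enumerate_append, List.foldl_append]
      rw [PySem.List.foldl_congr_mem (PySem.List.enumerate (PySem.Str.join "/" l).toList 0) _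
        (fun (s : PySem.Set String) ic =>
          if ic.2 == '/' then PySem.Set.add s (PySem.Str.slice (PySem.Str.join "/" l) none (some ic.1)) else s)
        _ ?agree]
      case agree =>
        intro acc p hp
        obtain ⟨k, hk, rfl⟩ := (PySem.List.mem_enumerate_iff _ _ _).mp hp
        dsimp only
        by_cases hc : (((PySem.Str.join "/" l).toList[k] == '/') = true)
        · rw [if_pos hc, if_pos hc]
          congr 1
          rw [zero_add, pvSliceTo, pvSliceTo, hkey,
            List.take_append_of_le_length (Nat.le_of_lt hk)]
        · rw [if_neg hc, if_neg hc]
      rw [ih hgood, PySem.List.enumerate_cons, List.foldl_cons]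
      have hslice : PySem.Str.slice (PySem.Str.join "/" (l ++ [x])) none
          (some (0 + ((PySem.Str.join "/" l).toList.length : Int))) = PySem.Str.join "/" l := by
        rw [zero_add, pvSliceTo, hkey, List.take_append_of_le_length (le_refl _),
          List.take_length, String.ofList_toList]
      dsimp only
      rw [if_pos (by rfl), hslice, pvScan_skip _ _ _ ?hskip2]
      · rw [PySem.Set.add_of_not_mem (pvNotMem_dropLast l hl), ← pvPJ_eq_dropLast l hl,
          List.dropLast_concat]
      case hskip2 =>
        intro p hp
        obtain ⟨k, hk, rfl⟩ := (PySem.List.mem_enumerate_iff _ _ _).mp hp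
        intro he
        exact hx.2 (he ▸ List.getElem_mem hk)

-- every piece of splitOn s ['/'] is slash-free
theorem pvGo_noSlash (fuel : Nat) : ∀ (l cur : List Char) (acc : List (List Char)),
    l.length ≤ fuel → ('/' : Char) ∉ cur → (∀ p ∈ acc, ('/' : Char) ∉ p) →
    ∀ p ∈ PySem.Chars.splitOn.go ['/'] fuel l cur acc, ('/' : Char) ∉ p := by
  induction fuel with
  | zero =>
    intro l cur acc hl hcur hacc p hp
    have hl0 : l = [] := List.eq_nil_of_length_eq_zero (Nat.le_zero.mp hl)
    subst hl0
    simp only [PySem.Chars.splitOn.go, List.append_nil, List.mem_reverse, List.mem_cons] at hp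
    rcases hp with rfl | h
    · simpa using hcur
    · exact hacc p h
  | succ fuel ih =>
    intro l cur acc hl hcur hacc p hp
    cases l with
    | nil =>
      simp only [PySem.Chars.splitOn.go, List.mem_reverse, List.mem_cons] at hp
      rcases hp with rfl | h
      · simpa using hcur
      · exact hacc p h
    | cons c rest =>
      rw [PySem.Chars.splitOn.go] at hp
      by_cases hc : ((['/'] : List Char).isPrefixOf (c :: rest)) = true
      · rw [if_pos hc] at hp
        refine ih _ [] (cur.reverse :: acc) (by simp at hl ⊢; omega) (by simp) ?_ p hp
        intro q hq
        rcases List.mem_cons.mp hq with rfl | hq'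
        · simpa using hcur
        · exact hacc q hq'
      · rw [if_neg hc] at hp
        have hcne : c ≠ '/' := by
          intro h
          apply hc
          rw [List.isPrefixOf_iff_prefix]
          exact ⟨rest, by simp [h]⟩
        refine ih rest (c :: cur) acc (by simp at hl ⊢; omega) ?_ hacc p hp
        intro hq
        rcases List.mem_cons.mp hq with h' | h'
        · exact hcne h'.symm
        · exact hcur h'

theorem pvSplit_noSlash (s : List Char) :
    ∀ p ∈ PySem.Chars.splitOn s ['/'], ('/' : Char) ∉ p := by
  intro p hp
  unfold PySem.Chars.splitOn at hp
  exact pvGo_noSlash (s.length + 1) s [] [] (by omega) (by simp) (by simp) p hp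

-- ===== VERDICT (by name: the statement is the Claim_ definition above) =====
set_option maxHeartbeats 1600000 in
theorem open_dir_set_for_current_py_spec : Claim_equal_open_dir_set_for_current_py := by
  intro current_rel _
  unfold Spec_open_dir_set_for_current_py open_dir_set_for_current_py open_dir_set_for_current_py_alt
  by_cases hs : PySem.Str.startswith current_rel "org/" = false
  · rw [if_pos hs, if_pos hs]
  · rw [if_neg hs, if_neg hs]
    dsimp only
    have hsplit : PySem.Str.split? (PySem.Str.slice current_rel (some 4) none) "/"
        = some ((PySem.Chars.splitOn (PySem.Str.slice current_rel (some 4) none).toList ['/']).map String.ofList) := by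
      unfold PySem.Str.split? PySem.Chars.split?
      rw [pvSep_toList]
      simp
    set parts := ((PySem.Str.split? (PySem.Str.slice current_rel (some 4) none) "/").getD []).filter (fun p => p != "") with hparts
    have hgoodParts : ∀ p ∈ parts, p ≠ "" ∧ ('/' : Char) ∉ p.toList := by
      intro p hp
      rw [hparts] at hp
      have hf := List.mem_filter.mp hp
      refine ⟨by simpa using hf.2, ?_⟩
      have hb := hf.1
      rw [hsplit] at hb
      simp only [Option.getD_some, List.mem_map] at hb
      obtain ⟨q, hq, rfl⟩ := hb
      rw [String.toList_ofList]
      exact pvSplit_noSlash _ q hq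
    have hgoodD : ∀ p ∈ parts.dropLast, p ≠ "" ∧ ('/' : Char) ∉ p.toList :=
      fun p hp => hgoodParts p (List.mem_of_mem_dropLast hp)
    rw [PySem.List.slice_to_neg_one]
    generalize hGen : parts.dropLast = segs
    rw [hGen] at hgoodD
    rw [pvA_fold segs, pvB_scan segs hgoodD]
    dsimp only
    by_cases hseg0 : segs = []
    · subst hseg0
      have hj : PySem.Str.join "/" ([] : List String) = "" := rfl
      rw [hj]
      simp [pvPJ]
    · have hdne : PySem.Str.join "/" segs ≠ "" := by
        obtain ⟨y, t, rfl⟩ := List.exists_cons_of_ne_nil hseg0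
        have hy : y ≠ "" := (hgoodD y (by simp)).1
        have hyl : y.toList ≠ [] := by
          intro h0
          apply hy
          rw [← String.ofList_toList (s := y), h0]
        intro hEq
        have hnil : (PySem.Str.join "/" (y :: t)).toList = [] := by rw [hEq]; rfl
        rw [PySem.Str.toList_join, pvSep_toList] at hnil
        cases t with
        | nil =>
          rw [List.map_cons, List.map_nil, PySem.Chars.join_singleton] at hnil
          exact hyl hnil
        | cons z u =>
          rw [List.map_cons, List.map_cons, PySem.Chars.join_cons_cons] at hnil
          simp at hnil
      rw [if_pos (by simpa [bne_iff_ne] using hdne)]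
      rw [PySem.Set.add_of_not_mem (pvNotMem_dropLast segs hseg0), ← pvPJ_eq_dropLast segs hseg0]
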